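-- pv_equiv track=rewrite | github.com/Solalarium/AoC_2020 | day06.py | get_allyes_answers
-- ===== SOURCE A (Python) =====
-- from string import ascii_lowercase
--
-- def get_allyes_answers(data):
--     data = data.split('\n')
--     answers = {}
--     for i in ascii_lowercase:
--         answers[i] = True
--     count = 0
--     for i in data:
--         # i represents single persons answer as a single string
--         for j in answers:
--             if not j in i:
--                 answers[j] = False
--     for i in answers:
--         if answers[i]: count += 1
--     return(count)
-- ===== SOURCE B (Python) =====
-- from string import ascii_lowercase
--
-- def get_allyes_answers(data):
--     lines = data.split('\n')
--     tally = {}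
--     for line in lines:
--         for c in set(line):
--             if c in ascii_lowercase:
--                 tally[c] = tally.get(c, 0) + 1
--     n = len(lines)
--     return sum(1 for v in tally.values() if v == n)
-- ===== Notes on version B (the rewrite author's own statement) =====
-- stated objective: alternative
-- what changed: Replaces A's elimination scheme (a 26-flag dict where every letter is tested against every line and switched off) by a counting scheme: tally per letter how many lines contain it, then count the letters whose tally equals the number of lines.
import Mathlib
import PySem

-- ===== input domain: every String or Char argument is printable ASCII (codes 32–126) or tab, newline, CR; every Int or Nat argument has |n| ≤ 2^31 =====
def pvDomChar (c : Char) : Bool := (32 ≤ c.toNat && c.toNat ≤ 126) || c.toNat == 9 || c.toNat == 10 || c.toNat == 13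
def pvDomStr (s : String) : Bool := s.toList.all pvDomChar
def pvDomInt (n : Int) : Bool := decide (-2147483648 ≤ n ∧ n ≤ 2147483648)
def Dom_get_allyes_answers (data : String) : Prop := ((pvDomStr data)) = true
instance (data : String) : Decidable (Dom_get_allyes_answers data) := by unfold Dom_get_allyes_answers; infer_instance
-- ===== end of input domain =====

-- B replaces A's 26-flag elimination dict (every letter switched off when a line misses it)
-- by a per-letter tally of how many lines contain it, counting tallies equal to the line count.


-- ===== PORT A =====
-- ascii_lowercase, iterated as single characters
def pvLettersA : List Char := "abcdefghijklmnopqrstuvwxyz".toList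

-- 'j in i' for the single-char key j is exactly char membership in the line
def get_allyes_answers (data : String) : Int :=
  let lines := PySem.Chars.splitOn data.toList ['\n']        -- data = data.split('\n')
  let answers : PySem.Dict Char Bool :=
    pvLettersA.foldl (fun d i => d.insert i true) PySem.Dict.empty
  let answers :=
    lines.foldl (fun d i =>
      (PySem.Dict.keys d).foldl (fun d j =>
        if !(i.contains j) then d.insert j false else d) d) answers
  (PySem.Dict.keys answers).foldl (fun count i =>
    if answers.getD i false then count + 1 else count) (0 : Int)

-- ===== PORT B =====
def pvLettersB : List Char := "abcdefghijklmnopqrstuvwxyz".toList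

def get_allyes_answers_alt (data : String) : Int :=
  let lines := PySem.Chars.splitOn data.toList ['\n']
  let tally : PySem.Dict Char Int :=
    lines.foldl (fun tally line =>
      (PySem.Set.ofList line).foldl (fun tally c =>
        if pvLettersB.contains c then tally.insert c (tally.getD c 0 + 1) else tally) tally)
      PySem.Dict.empty
  let n : Int := (lines.length : Int)
  (PySem.Dict.values tally).foldl (fun acc v => if v = n then acc + 1 else acc) (0 : Int)

-- ===== PRECONDITION & SPEC =====
def Spec_get_allyes_answers (data : String) (out : Int) : Prop := out = get_allyes_answers_alt data
instance (data : String) (out : Int) : Decidable (Spec_get_allyes_answers data out) := by unfold Spec_get_allyes_answers; infer_instance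

-- ===== CLAIM (what is proved, stated in full; the proofs are below) =====
def Claim_equal_get_allyes_answers : Prop := ∀ (data : String), Dom_get_allyes_answers data → Spec_get_allyes_answers data (get_allyes_answers data)

-- ===== LEMMAS AND PROOFS =====

-- split('\n') always yields at least one piece
theorem splitOn_go_ne_nil (sep : List Char) :
    ∀ (fuel : Nat) (l cur : List Char) (acc : List (List Char)),
      PySem.Chars.splitOn.go sep fuel l cur acc ≠ [] := by
  intro fuel
  induction fuel with
  | zero => intro l cur acc; simp [PySem.Chars.splitOn.go]
  | succ f ih =>
    intro l cur acc
    cases l with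
    | nil => simp [PySem.Chars.splitOn.go]
    | cons c rest =>
      rw [PySem.Chars.splitOn.go]
      by_cases h : sep.isPrefixOf (c :: rest) = true
      · rw [if_pos h]; exact ih _ _ _
      · rw [if_neg h]; exact ih _ _ _

theorem splitOn_ne_nil (xs : List Char) : PySem.Chars.splitOn xs ['\n'] ≠ [] :=
  splitOn_go_ne_nil _ _ _ _ _

-- ---- A side: the flag dict ends up recording "every line contains the letter" ----

theorem inner_getD (line : List Char) :
    ∀ (ks : List Char) (d : PySem.Dict Char Bool) (x : Char),
      (ks.foldl (fun d j => if !(line.contains j) then d.insert j false else d) d).getD x false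
        = (d.getD x false && (!(ks.contains x) || line.contains x)) := by
  intro ks
  induction ks with
  | nil => intro d x; simp
  | cons j js ih =>
    intro d x
    simp only [List.foldl_cons, ih]
    by_cases hl : line.contains j
    · simp only [hl, Bool.not_true, Bool.false_eq_true, reduceIte]
      by_cases hx : x = j
      · subst hx
        have hm : x ∈ line := by simpa using hl
        simp [hm]
      · simp [hx]
    · simp only [Bool.not_eq_true] at hl
      simp only [hl, Bool.not_false, if_pos]
      rw [PySem.Dict.getD_insert]
      by_cases hx : x = j
      · subst hx
        have hm : x ∉ line := by simpa using hl
        simp [hm]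
      · simp [hx]

theorem inner_keys (line : List Char) :
    ∀ (ks : List Char) (d : PySem.Dict Char Bool),
      (∀ j ∈ ks, d.contains j = true) →
      (ks.foldl (fun d j => if !(line.contains j) then d.insert j false else d) d).keys = d.keys := by
  intro ks
  induction ks with
  | nil => intro d _; simp
  | cons j js ih =>
    intro d h
    simp only [List.foldl_cons]
    by_cases hl : line.contains j
    · simp only [hl, Bool.not_true, Bool.false_eq_true, reduceIte]
      exact ih d (fun k hk => h k (List.mem_cons_of_mem _ hk))
    · simp only [Bool.not_eq_true] at hl
      simp only [hl, Bool.not_false, if_pos]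
      have hc : d.contains j = true := h j (List.mem_cons_self ..)
      rw [ih (d.insert j false)
        (fun k hk => by rw [PySem.Dict.contains_insert];
                        simp [h k (List.mem_cons_of_mem _ hk)])]
      exact PySem.Dict.keys_insert_of_contains d false hc

theorem outer_keys (lines : List (List Char)) :
    ∀ (d : PySem.Dict Char Bool),
      (lines.foldl (fun d i =>
        (PySem.Dict.keys d).foldl (fun d j =>
          if !(i.contains j) then d.insert j false else d) d) d).keys = d.keys := by
  induction lines with
  | nil => intro d; rfl
  | cons l ls ih =>
    intro d
    rw [List.foldl_cons, ih, inner_keys l d.keys d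
      (fun j hj => (PySem.Dict.contains_iff_mem_keys d j).2 hj)]

theorem outer_getD (lines : List (List Char)) :
    ∀ (d : PySem.Dict Char Bool) (x : Char), x ∈ d.keys →
      (lines.foldl (fun d i =>
        (PySem.Dict.keys d).foldl (fun d j =>
          if !(i.contains j) then d.insert j false else d) d) d).getD x false
        = (d.getD x false && lines.all (fun l => l.contains x)) := by
  induction lines with
  | nil => intro d x _; simp
  | cons l ls ih =>
    intro d x hx
    rw [List.foldl_cons]
    have hk := inner_keys l d.keys d (fun j hj => (PySem.Dict.contains_iff_mem_keys d j).2 hj)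
    rw [ih _ x (by rw [hk]; exact hx), inner_getD l d.keys d x]
    simp [hx, List.all_cons, Bool.and_assoc]

theorem count_foldl (b : Char → Bool) :
    ∀ (l : List Char) (acc : Int),
      l.foldl (fun count i => if b i then count + 1 else count) acc
        = acc + ((l.filter b).length : Int) := by
  intro l
  induction l with
  | nil => intro acc; simp
  | cons x xs ih =>
    intro acc
    by_cases hb : b x
    · simp [hb, ih]; ring
    · simp [hb, ih]

theorem items_init :
    (pvLettersA.foldl (fun d i => d.insert i true) (PySem.Dict.empty : PySem.Dict Char Bool)).items
      = pvLettersA.map (fun c => (c, true)) := by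
  have := PySem.Dict.items_foldl_insert_fresh (ν := Bool) pvLettersA (fun c => c) (fun _ => true)
    PySem.Dict.empty (by intro a _; rfl) (by decide)
  simpa using this

theorem keys_init :
    (pvLettersA.foldl (fun d i => d.insert i true) (PySem.Dict.empty : PySem.Dict Char Bool)).keys
      = pvLettersA := by
  show (pvLettersA.foldl (fun d i => d.insert i true)
    (PySem.Dict.empty : PySem.Dict Char Bool)).items.map (·.1) = pvLettersA
  rw [items_init]; simp [Function.comp_def]

theorem getD_init (c : Char) (hc : c ∈ pvLettersA) :
    (pvLettersA.foldl (fun d i => d.insert i true) (PySem.Dict.empty : PySem.Dict Char Bool)).getD c false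
      = true := by
  apply PySem.Dict.getD_of_mem_items
  · rw [items_init]; exact List.mem_map.2 ⟨c, hc, rfl⟩
  · rw [keys_init]; decide

-- A's result in closed form: the lowercase letters contained in every line
theorem a_char (data : String) :
    get_allyes_answers data
      = (((pvLettersA.filter
            (fun c => (PySem.Chars.splitOn data.toList ['\n']).all
              (fun l => l.contains c))).length : Int)) := by
  unfold get_allyes_answers
  simp only []
  set lines := PySem.Chars.splitOn data.toList ['\n'] with hlines
  set d0 := pvLettersA.foldl (fun d i => d.insert i true) (PySem.Dict.empty : PySem.Dict Char Bool)
    with hd0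
  set dF := lines.foldl (fun d i =>
      (PySem.Dict.keys d).foldl (fun d j =>
        if !(i.contains j) then d.insert j false else d) d) d0 with hdF
  have hkeys : dF.keys = pvLettersA := by rw [hdF, outer_keys, keys_init]
  rw [count_foldl (fun i => dF.getD i false) dF.keys 0, hkeys]
  have hfilter : pvLettersA.filter (fun i => dF.getD i false)
      = pvLettersA.filter (fun c => lines.all (fun l => l.contains c)) := by
    apply List.filter_congr
    intro x hx
    rw [hdF, outer_getD lines d0 x (by rw [keys_init]; exact hx), getD_init x hx]
    simp
  rw [hfilter]
  simp

-- ---- B side: the tally dict ----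

-- the inner per-line loop with its letter test, as a filtered plain counting loop
theorem b_inner (line : List Char) (d : PySem.Dict Char Int) :
    (PySem.Set.ofList line).foldl (fun t c =>
        if pvLettersB.contains c then t.insert c (t.getD c 0 + 1) else t) d
      = ((PySem.Set.ofList line).filter (fun c => pvLettersB.contains c)).foldl
          (fun t c => t.insert c (t.getD c 0 + 1)) d :=
  PySem.List.foldl_if_eq_foldl_filter _ _ _ _

theorem b_getD (lines : List (List Char)) :
    ∀ (d : PySem.Dict Char Int) (c : Char),
      (lines.foldl (fun tally line =>
        (PySem.Set.ofList line).foldl (fun tally c =>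
          if pvLettersB.contains c then tally.insert c (tally.getD c 0 + 1) else tally) tally) d).getD c 0
        = d.getD c 0 + (if pvLettersB.contains c
            then ((lines.countP (fun l => l.contains c) : Nat) : Int) else 0) := by
  induction lines with
  | nil => intro d c; simp
  | cons l ls ih =>
    intro d c
    rw [List.foldl_cons, ih, b_inner, PySem.Dict.getD_foldl_insert_add_one]
    have hcount : ((PySem.Set.ofList l).filter (fun c => pvLettersB.contains c)).count c
        = if c ∈ pvLettersB ∧ c ∈ l then 1 else 0 := by
      by_cases hmem : c ∈ (PySem.Set.ofList l).filter (fun c => pvLettersB.contains c)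
      · have hm := List.mem_filter.1 hmem
        have hl : c ∈ l := (PySem.Set.mem_ofList l c).1 hm.1
        have hb : c ∈ pvLettersB := List.contains_iff_mem.1 hm.2
        rw [List.count_eq_one_of_mem (((PySem.Set.nodup_ofList l)).filter _) hmem,
          if_pos ⟨hb, hl⟩]
      · rw [List.count_eq_zero_of_not_mem hmem, if_neg]
        intro ⟨h1, h2⟩
        exact hmem (List.mem_filter.2 ⟨(PySem.Set.mem_ofList l c).2 h2,
          List.contains_iff_mem.2 h1⟩)
    rw [hcount]
    by_cases hb : c ∈ pvLettersB
    · have hb' : pvLettersB.contains c = true := List.contains_iff_mem.2 hb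
      by_cases hl : c ∈ l
      · have hl' : l.contains c = true := List.contains_iff_mem.2 hl
        simp only [hb, hl, and_self, if_pos, hb', List.countP_cons, hl', if_pos]
        push_cast
        ring
      · have hl' : l.contains c = false := by
          rw [Bool.eq_false_iff]; exact fun h => hl (List.contains_iff_mem.1 h)
        have hnot : ¬ (c ∈ pvLettersB ∧ c ∈ l) := fun h => hl h.2
        simp [hb, List.countP_cons]
        simp [hl]
    · have hb' : pvLettersB.contains c = false := by
        rw [Bool.eq_false_iff]; exact fun h => hb (List.contains_iff_mem.1 h)
      have hnot : ¬ (c ∈ pvLettersB ∧ c ∈ l) := fun h => hb h.1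
      simp [hb]

theorem b_keys_mem (lines : List (List Char)) :
    ∀ (d : PySem.Dict Char Int) (c : Char),
      c ∈ (lines.foldl (fun tally line =>
        (PySem.Set.ofList line).foldl (fun tally c =>
          if pvLettersB.contains c then tally.insert c (tally.getD c 0 + 1) else tally) tally) d).keys
      ↔ c ∈ d.keys ∨ (pvLettersB.contains c ∧ lines.any (fun l => l.contains c)) := by
  induction lines with
  | nil => intro d c; simp
  | cons l ls ih =>
    intro d c
    rw [List.foldl_cons, ih, b_inner, PySem.Dict.keys_foldl_insert, PySem.Set.mem_update]
    constructor
    · rintro ((h | h) | h)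
      · exact Or.inl h
      · have hm := List.mem_filter.1 h
        have hl : l.contains c := by simpa using (PySem.Set.mem_ofList l c).1 hm.1
        refine Or.inr ⟨hm.2, ?_⟩
        simp only [List.any_cons, Bool.or_eq_true]
        exact Or.inl hl
      · refine Or.inr ⟨h.1, ?_⟩
        simp only [List.any_cons, Bool.or_eq_true]
        exact Or.inr h.2
    · rintro (h | ⟨hb, hany⟩)
      · exact Or.inl (Or.inl h)
      · rw [List.any_cons, Bool.or_eq_true] at hany
        rcases hany with hl | hls
        · exact Or.inl (Or.inr (List.mem_filter.2
            ⟨(PySem.Set.mem_ofList l c).2 (by simpa using hl), hb⟩))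
        · exact Or.inr ⟨hb, hls⟩

theorem b_keys_nodup (lines : List (List Char)) :
    ∀ (d : PySem.Dict Char Int), d.keys.Nodup →
      (lines.foldl (fun tally line =>
        (PySem.Set.ofList line).foldl (fun tally c =>
          if pvLettersB.contains c then tally.insert c (tally.getD c 0 + 1) else tally) tally) d).keys.Nodup := by
  induction lines with
  | nil => intro d h; exact h
  | cons l ls ih =>
    intro d h
    rw [List.foldl_cons]
    apply ih
    rw [b_inner]
    exact PySem.Dict.nodup_keys_foldl_insert _ _ _ h

-- ===== VERDICT (by name: the statement is the Claim_ definition above) =====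
theorem get_allyes_answers_spec : Claim_equal_get_allyes_answers := by
  intro data _
  unfold Spec_get_allyes_answers
  rw [a_char]
  unfold get_allyes_answers_alt
  simp only []
  set lines := PySem.Chars.splitOn data.toList ['\n'] with hlines
  set tally := lines.foldl (fun tally line =>
      (PySem.Set.ofList line).foldl (fun tally c =>
        if pvLettersB.contains c then tally.insert c (tally.getD c 0 + 1) else tally) tally)
      (PySem.Dict.empty : PySem.Dict Char Int) with htally
  have hnodup : tally.keys.Nodup := b_keys_nodup lines PySem.Dict.empty (by simp)
  -- the counting loop over the values is a countP
  rw [PySem.List.foldl_ite_add_one (fun v => v = (lines.length : Int)) tally.values 0]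
  rw [PySem.Dict.values_eq_map_keys tally hnodup 0, List.countP_map]
  have hne : lines ≠ [] := splitOn_ne_nil data.toList
  -- on tally's keys, "tally = number of lines" is "every line contains the letter"
  have hcongr : tally.keys.countP
        ((fun v => decide (v = (lines.length : Int))) ∘ (fun k => tally.getD k 0))
      = tally.keys.countP (fun c => lines.all (fun l => l.contains c)) := by
    apply List.countP_congr
    intro c hc
    have hb : pvLettersB.contains c := by
      rcases (b_keys_mem lines PySem.Dict.empty c).1 hc with h | h
      · simp at h
      · exact h.1
    have hg := b_getD lines PySem.Dict.empty c
    rw [← htally] at hg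
    simp only [hb, if_pos, PySem.Dict.getD_empty, zero_add] at hg
    simp only [Function.comp_apply, hg, Nat.cast_inj]
    simp [List.countP_eq_length, List.all_eq_true]
  rw [hcongr, List.countP_eq_length_filter]
  -- the filtered key list is a permutation of A's filtered alphabet
  have hperm : (tally.keys.filter (fun c => lines.all (fun l => l.contains c))).Perm
      (pvLettersA.filter (fun c => lines.all (fun l => l.contains c))) := by
    apply (List.perm_ext_iff_of_nodup (hnodup.filter _) ((by decide : pvLettersA.Nodup).filter _)).2
    intro c
    rw [List.mem_filter, List.mem_filter]
    have hk := b_keys_mem lines PySem.Dict.empty c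
    rw [← htally] at hk
    rw [hk]
    simp only [PySem.Dict.keys_empty, List.not_mem_nil, false_or]
    constructor
    · rintro ⟨⟨hb, _⟩, hall⟩
      have hBA : pvLettersB = pvLettersA := rfl
      exact ⟨hBA ▸ List.contains_iff_mem.1 hb, hall⟩
    · rintro ⟨hmem, hall⟩
      have hBA : pvLettersA = pvLettersB := rfl
      refine ⟨⟨List.contains_iff_mem.2 (hBA ▸ hmem), ?_⟩, hall⟩
      rcases List.exists_mem_of_ne_nil lines hne with ⟨l, hl⟩
      exact List.any_eq_true.2 ⟨l, hl, List.all_eq_true.1 hall l hl⟩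
  rw [hperm.length_eq]
  simp
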